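-- pv_equiv track=rewrite | github.com/ansonb/reverse_dictionary | ml/train_parse_tree_bucket.py | makeBucketwiseLevelArr
-- ===== SOURCE A (Python) =====
-- def findCorrespondingBucket(num_levels,bucket_size_arr):
-- 	#assumption that bucket_size_arr is sorted
-- 	for bucket_num,bucket_size in enumerate(bucket_size_arr):
-- 		if num_levels<bucket_size:
-- 			return bucket_num
-- 	raise("num_levels must be lesser than the maximum bucket size")
--
-- def makeBucketwiseLevelArr(level_arr_arr,bucket_size_arr):
-- 	bucket_level_arr = [[] for _ in bucket_size_arr]
-- 	bucket_info = []
-- 	for level_arr in level_arr_arr: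
-- 		bucket_num = findCorrespondingBucket(len(level_arr),bucket_size_arr)
-- 		bucket_level_arr[bucket_num].append(level_arr)
-- 		bucket_info.append(bucket_num)
--
-- 	return bucket_level_arr, bucket_info
-- ===== SOURCE B (Python) =====
-- def _bucket_for(v, pm):
--     # pm: list of (size, index) with strictly increasing sizes; find first size > v
--     lo, hi = 0, len(pm)
--     while lo < hi:
--         mid = (lo + hi) // 2
--         if pm[mid][0] <= v:
--             lo = mid + 1
--         else:
--             hi = mid
--     if lo == len(pm):
--         raise ValueError("num_levels must be lesser than the maximum bucket size")
--     return pm[lo][1]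
--
-- def makeBucketwiseLevelArr(level_arr_arr, bucket_size_arr):
--     # strict prefix maxima: the only bucket positions a first match can ever hit
--     pm = []
--     for i, s in enumerate(bucket_size_arr):
--         if not pm or s > pm[-1][0]:
--             pm.append((s, i))
--     bucket_level_arr = [[] for _ in bucket_size_arr]
--     bucket_info = []
--     memo = {}  # length -> bucket index, each distinct length searched once
--     for level_arr in level_arr_arr:
--         v = len(level_arr)
--         b = memo.get(v)
--         if b is None:
--             b = _bucket_for(v, pm)
--             memo[v] = b
--         bucket_level_arr[b].append(level_arr)
--         bucket_info.append(b)
--     return bucket_level_arr, bucket_info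
-- ===== Notes on version B (the rewrite author's own statement) =====
-- stated objective: alternative
-- what changed: B precomputes the strict prefix-maxima of bucket_size_arr once (the only positions a first match can hit) and resolves each item's bucket by a length-memoised binary search over that increasing list, instead of A's linear scan over all buckets for every level_arr.
import Mathlib
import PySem

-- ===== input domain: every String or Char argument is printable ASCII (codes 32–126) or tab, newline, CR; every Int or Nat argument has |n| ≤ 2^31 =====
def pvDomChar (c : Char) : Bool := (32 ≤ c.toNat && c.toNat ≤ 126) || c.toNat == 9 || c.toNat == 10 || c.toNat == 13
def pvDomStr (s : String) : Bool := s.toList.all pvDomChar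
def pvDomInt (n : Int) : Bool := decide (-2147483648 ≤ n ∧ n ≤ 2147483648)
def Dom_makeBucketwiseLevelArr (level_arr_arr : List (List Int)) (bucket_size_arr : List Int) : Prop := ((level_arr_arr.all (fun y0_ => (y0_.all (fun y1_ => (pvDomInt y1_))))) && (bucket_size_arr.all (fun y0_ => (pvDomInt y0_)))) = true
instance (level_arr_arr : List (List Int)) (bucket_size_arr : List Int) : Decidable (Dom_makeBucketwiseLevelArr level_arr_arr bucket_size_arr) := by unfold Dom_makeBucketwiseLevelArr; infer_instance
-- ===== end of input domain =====

-- B replaces A's per-item linear scan over all buckets by a one-time strict-prefix-maxima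
-- index of bucket_size_arr plus a length-memoised binary search per item (objective: alternative
-- search strategy; not measurably faster on the probe's inputs).
-- Return-value equivalence only; neither version mutates its arguments.

-- ===== PORT A =====
-- findCorrespondingBucket's enumerate loop; returns none where Python hits the raise
def fcbGo (num_levels : Int) (bucket_num : Nat) : List Int → Option Nat
  | [] => none
  | bucket_size :: rest =>
      if num_levels < bucket_size then some bucket_num
      else fcbGo num_levels (bucket_num + 1) rest

def findCorrespondingBucket (num_levels : Int) (bucket_size_arr : List Int) : Option Nat :=
  fcbGo num_levels 0 bucket_size_arr

def makeBucketwiseLevelArr (level_arr_arr : List (List Int)) (bucket_size_arr : List Int) : List (List (List Int)) × List Int :=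
  level_arr_arr.foldl
    (fun st level_arr =>
      match findCorrespondingBucket (level_arr.length : Int) bucket_size_arr with
      | some bucket_num =>
          (st.1.modify bucket_num (fun b => b ++ [level_arr]), st.2 ++ [(bucket_num : Int)])
      | none => st)  -- Python raises here; excluded by Pre_
    (bucket_size_arr.map (fun _ => ([] : List (List Int))), ([] : List Int))

-- ===== PORT B =====
-- the while lo < hi binary-search loop of _bucket_for
def bsGo (v : Int) (pm : List (Int × Nat)) (lo hi : Nat) : Nat :=
  if _h : lo < hi then
    if (pm.getD ((lo + hi) / 2) (0, 0)).1 ≤ v then bsGo v pm ((lo + hi) / 2 + 1) hi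
    else bsGo v pm lo ((lo + hi) / 2)
  else lo
termination_by hi - lo
decreasing_by all_goals omega

-- _bucket_for; returns none where Python hits the raise
def bucketFor (v : Int) (pm : List (Int × Nat)) : Option Nat :=
  let lo := bsGo v pm 0 pm.length
  if lo = pm.length then none else some (pm.getD lo (0, 0)).2

-- the prefix-maxima building loop (pm[-1][0] = getLast?)
def pmGo : List Int → Nat → List (Int × Nat) → List (Int × Nat)
  | [], _, pm => pm
  | s :: rest, i, pm =>
      if pm.getLast?.all (fun p => p.1 < s) then pmGo rest (i + 1) (pm ++ [(s, i)])
      else pmGo rest (i + 1) pm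

-- the per-item loop body: memo.get, on a miss the binary search plus a memo insert
def altStep (pm : List (Int × Nat)) (st : (List (List (List Int)) × List Int) × PySem.Dict Int Nat)
    (level_arr : List Int) : (List (List (List Int)) × List Int) × PySem.Dict Int Nat :=
  let v : Int := level_arr.length
  match st.2.get? v with
  | some b => ((st.1.1.modify b (fun x => x ++ [level_arr]), st.1.2 ++ [(b : Int)]), st.2)
  | none =>
    match bucketFor v pm with
    | some b => ((st.1.1.modify b (fun x => x ++ [level_arr]), st.1.2 ++ [(b : Int)]), st.2.insert v b)
    | none => st  -- Python raises here; excluded by Pre_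

def makeBucketwiseLevelArr_alt (level_arr_arr : List (List Int)) (bucket_size_arr : List Int) : List (List (List Int)) × List Int :=
  let pm := pmGo bucket_size_arr 0 []
  (level_arr_arr.foldl (altStep pm)
    ((bucket_size_arr.map (fun _ => ([] : List (List Int))), ([] : List Int)), PySem.Dict.empty)).1

-- ===== PRECONDITION & SPEC =====
-- Pre_ excludes exactly the inputs where some level_arr fits no bucket: there Python A raises
-- (TypeError, from raising a string) and Python B raises ValueError.
def Pre_makeBucketwiseLevelArr (level_arr_arr : List (List Int)) (bucket_size_arr : List Int) : Prop :=
  ∀ la ∈ level_arr_arr, ∃ s ∈ bucket_size_arr, (la.length : Int) < s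
instance (level_arr_arr : List (List Int)) (bucket_size_arr : List Int) : Decidable (Pre_makeBucketwiseLevelArr level_arr_arr bucket_size_arr) := by unfold Pre_makeBucketwiseLevelArr; infer_instance
def pvWitness_makeBucketwiseLevelArr : List (List Int) × List Int := ([[5], []], [1, 3])

def Spec_makeBucketwiseLevelArr (level_arr_arr : List (List Int)) (bucket_size_arr : List Int) (out : List (List (List Int)) × List Int) : Prop := out = makeBucketwiseLevelArr_alt level_arr_arr bucket_size_arr
instance (level_arr_arr : List (List Int)) (bucket_size_arr : List Int) (out : List (List (List Int)) × List Int) : Decidable (Spec_makeBucketwiseLevelArr level_arr_arr bucket_size_arr out) := by unfold Spec_makeBucketwiseLevelArr; infer_instance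

-- ===== CLAIM (what is proved, stated in full; the proofs are below) =====
def Claim_equal_makeBucketwiseLevelArr : Prop := ∀ (level_arr_arr : List (List Int)) (bucket_size_arr : List Int), Dom_makeBucketwiseLevelArr level_arr_arr bucket_size_arr → Pre_makeBucketwiseLevelArr level_arr_arr bucket_size_arr → Spec_makeBucketwiseLevelArr level_arr_arr bucket_size_arr (makeBucketwiseLevelArr level_arr_arr bucket_size_arr)

-- ===== LEMMAS AND PROOFS =====

-- accumulator-free form of pmGo, threading only the running maximum
def pmAux : List Int → Nat → Option Int → List (Int × Nat)
  | [], _, _ => []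
  | s :: rest, i, m =>
      if m.all (fun t => t < s) then (s, i) :: pmAux rest (i + 1) (some s)
      else pmAux rest (i + 1) m

theorem pmGo_eq_pmAux : ∀ (l : List Int) (i : Nat) (pm : List (Int × Nat)),
    pmGo l i pm = pm ++ pmAux l i (pm.getLast?.map Prod.fst) := by
  intro l
  induction l with
  | nil => intro i pm; simp [pmGo, pmAux]
  | cons s rest ih =>
    intro i pm
    have hcond : (pm.getLast?.all fun p => p.1 < s) = ((pm.getLast?.map Prod.fst).all fun t => t < s) := by
      cases pm.getLast? <;> simp
    rw [pmGo, pmAux, hcond]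
    by_cases h : ((pm.getLast?.map Prod.fst).all fun t => t < s) = true
    · rw [if_pos h, if_pos h, ih]
      simp [List.getLast?_append]
    · rw [if_neg h, if_neg h, ih]

-- linear version of the pm lookup (first entry with fst > v)
def linB (v : Int) : List (Int × Nat) → Option Nat
  | [] => none
  | (s, i) :: rest => if v < s then some i else linB v rest

-- the pm lookup agrees with A's scan over the original array
theorem linB_pmAux : ∀ (l : List Int) (i : Nat) (m : Option Int) (v : Int),
    (∀ t, m = some t → t ≤ v) → linB v (pmAux l i m) = fcbGo v i l := by
  intro l
  induction l with
  | nil => intro i m v _; simp [pmAux, fcbGo, linB]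
  | cons s rest ih =>
    intro i m v hm
    rw [pmAux, fcbGo]
    by_cases hc : (m.all fun t => t < s) = true
    · rw [if_pos hc, linB]
      by_cases hv : v < s
      · rw [if_pos hv, if_pos hv]
      · rw [if_neg hv, if_neg hv]
        exact ih (i + 1) (some s) v (by intro t ht; cases ht; omega)
    · rw [if_neg hc]
      obtain ⟨t, hmt, hts⟩ : ∃ t, m = some t ∧ ¬ t < s := by
        cases m with
        | none => simp at hc
        | some t => exact ⟨t, rfl, by simpa using hc⟩
      have htv : t ≤ v := hm t hmt
      have hv : ¬ v < s := by omega
      rw [if_neg hv]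
      exact ih (i + 1) m v hm

-- every fst in pmAux … (some t) exceeds t
theorem pmAux_lb : ∀ (l : List Int) (i : Nat) (t : Int),
    ∀ p ∈ pmAux l i (some t), t < p.1 := by
  intro l
  induction l with
  | nil => intro i t p hp; simp [pmAux] at hp
  | cons s rest ih =>
    intro i t p hp
    rw [pmAux] at hp
    by_cases hc : ((some t).all fun u => u < s) = true
    · rw [if_pos hc] at hp
      have hts : t < s := by simpa using hc
      rcases List.mem_cons.mp hp with h | h
      · subst h; exact hts
      · exact lt_trans hts (ih (i + 1) s p h)
    · rw [if_neg hc] at hp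
      exact ih (i + 1) t p hp

theorem pmAux_sorted : ∀ (l : List Int) (i : Nat) (m : Option Int),
    List.Pairwise (fun a b : Int × Nat => a.1 < b.1) (pmAux l i m) := by
  intro l
  induction l with
  | nil => intro i m; simp [pmAux]
  | cons s rest ih =>
    intro i m
    rw [pmAux]
    by_cases hc : (m.all fun t => t < s) = true
    · rw [if_pos hc]
      exact List.pairwise_cons.mpr ⟨fun p hp => pmAux_lb rest (i + 1) s p hp, ih (i + 1) (some s)⟩
    · rw [if_neg hc]; exact ih (i + 1) m

-- binary search returns the first index with fst > v, for a strictly increasing pm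
theorem bsGo_eq : ∀ (v : Int) (pm : List (Int × Nat)) (k : Nat),
    k ≤ pm.length →
    (∀ i (h : i < pm.length), i < k → ¬ v < pm[i].1) →
    (∀ i (h : i < pm.length), k ≤ i → v < pm[i].1) →
    ∀ (n lo hi : Nat), hi - lo ≤ n → lo ≤ k → k ≤ hi → hi ≤ pm.length →
    bsGo v pm lo hi = k := by
  intro v pm k hk hbelow habove n
  induction n with
  | zero =>
    intro lo hi h1 h2 h3 h4
    rw [bsGo, dif_neg (by omega)]; omega
  | succ n ih =>
    intro lo hi h1 h2 h3 h4
    rw [bsGo]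
    by_cases hlh : lo < hi
    · rw [dif_pos hlh]
      have hmid1 : lo ≤ (lo + hi) / 2 := by omega
      have hmid2 : (lo + hi) / 2 < hi := by omega
      have hmlen : (lo + hi) / 2 < pm.length := by omega
      rw [List.getD_eq_getElem pm (0,0) hmlen]
      by_cases hle : pm[(lo + hi) / 2].1 ≤ v
      · rw [if_pos hle]
        have : ¬ k ≤ (lo + hi) / 2 := fun hkm => absurd (habove _ hmlen hkm) (by omega)
        exact ih ((lo + hi) / 2 + 1) hi (by omega) (by omega) h3 h4
      · rw [if_neg hle]
        have : ¬ (lo + hi) / 2 < k := fun hmk => hbelow _ hmlen hmk (by omega)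
        exact ih lo ((lo + hi) / 2) (by omega) h2 (by omega) (by omega)
    · rw [dif_neg hlh]; omega

-- linB in threshold form via findIdx
theorem linB_eq_findIdx : ∀ (v : Int) (pm : List (Int × Nat)),
    linB v pm = (if pm.findIdx (fun p => decide (v < p.1)) = pm.length then none
                 else some (pm.getD (pm.findIdx (fun p => decide (v < p.1))) (0, 0)).2) := by
  intro v pm
  induction pm with
  | nil => simp [linB]
  | cons p rest ih =>
    obtain ⟨s, i⟩ := p
    rw [linB, List.findIdx_cons]
    by_cases hv : v < s
    · simp [hv]
    · simp only [hv, decide_false, if_false, cond_false, List.length_cons]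
      rw [ih]
      by_cases hend : rest.findIdx (fun p => decide (v < p.1)) = rest.length
      · rw [if_pos hend, if_pos (by omega)]
      · rw [if_neg hend, if_neg (by omega), List.getD_cons_succ]

-- bucketFor = linB on a strictly increasing pm
theorem bucketFor_eq_linB (v : Int) (pm : List (Int × Nat))
    (hs : List.Pairwise (fun a b : Int × Nat => a.1 < b.1) pm) :
    bucketFor v pm = linB v pm := by
  set k := pm.findIdx (fun p => decide (v < p.1)) with hkdef
  have hk : k ≤ pm.length := List.findIdx_le_length
  have hbelow : ∀ i (h : i < pm.length), i < k → ¬ v < pm[i].1 := by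
    intro i h hik
    have := List.not_of_lt_findIdx (p := fun p : Int × Nat => decide (v < p.1)) (xs := pm) (by omega)
    simpa using this
  have habove : ∀ i (h : i < pm.length), k ≤ i → v < pm[i].1 := by
    intro i h hki
    have hkl : k < pm.length := by omega
    have hkv : v < pm[k].1 := by
      have := List.findIdx_getElem (w := hkl) (p := fun p : Int × Nat => decide (v < p.1)) (xs := pm)
      simpa using this
    rcases Nat.eq_or_lt_of_le hki with h' | h'
    · subst h'; exact hkv
    · have := (List.pairwise_iff_getElem.mp hs) k i hkl h h'
      omega
  have hbs : bsGo v pm 0 pm.length = k :=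
    bsGo_eq v pm k hk hbelow habove pm.length 0 pm.length (by omega) (by omega) hk (le_refl _)
  rw [bucketFor, linB_eq_findIdx]
  simp only [hbs, ← hkdef]

-- the bridge: B's lookup equals A's scan, for every v
theorem bridge (v : Int) (bsa : List Int) :
    bucketFor v (pmGo bsa 0 []) = findCorrespondingBucket v bsa := by
  have hpm : pmGo bsa 0 [] = pmAux bsa 0 none := by
    rw [pmGo_eq_pmAux]; simp
  rw [hpm, bucketFor_eq_linB v _ (pmAux_sorted bsa 0 none)]
  exact linB_pmAux bsa 0 none v (by intro t ht; cases ht)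

-- A's loop body, named for the fold induction
def aStep (bsa : List Int) (st : List (List (List Int)) × List Int) (level_arr : List Int) :
    List (List (List Int)) × List Int :=
  match findCorrespondingBucket ((level_arr : List Int).length : Int) bsa with
  | some bucket_num => (st.1.modify bucket_num (fun b => b ++ [level_arr]), st.2 ++ [(bucket_num : Int)])
  | none => st

-- the two folds agree whenever the memo only holds correct answers
theorem fold_eq (bsa : List Int) : ∀ (laa : List (List Int)) (sA : List (List (List Int)) × List Int)
    (memo : PySem.Dict Int Nat),
    (∀ v b, memo.get? v = some b → findCorrespondingBucket v bsa = some b) →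
    (laa.foldl (altStep (pmGo bsa 0 [])) (sA, memo)).1 = laa.foldl (aStep bsa) sA := by
  intro laa
  induction laa with
  | nil => intro sA memo _; simp
  | cons la rest ih =>
    intro sA memo hinv
    rw [List.foldl_cons, List.foldl_cons]
    rcases hm : memo.get? ((la : List Int).length : Int) with _ | b
    · rcases hf : bucketFor ((la : List Int).length : Int) (pmGo bsa 0 []) with _ | b
      · have hA : findCorrespondingBucket ((la : List Int).length : Int) bsa = none := by
          rw [← bridge]; exact hf
        rw [show altStep (pmGo bsa 0 []) (sA, memo) la = (sA, memo) by
              simp only [altStep, hm, hf],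
            show aStep bsa sA la = sA by simp only [aStep, hA]]
        exact ih sA memo hinv
      · have hA : findCorrespondingBucket ((la : List Int).length : Int) bsa = some b := by
          rw [← bridge]; exact hf
        rw [show altStep (pmGo bsa 0 []) (sA, memo) la
              = ((sA.1.modify b (fun x => x ++ [la]), sA.2 ++ [(b : Int)]),
                 memo.insert ((la : List Int).length : Int) b) by
              simp only [altStep, hm, hf],
            show aStep bsa sA la = (sA.1.modify b (fun x => x ++ [la]), sA.2 ++ [(b : Int)]) by
              simp only [aStep, hA]]
        apply ih
        intro v b' hv
        rw [PySem.Dict.get?_insert] at hv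
        by_cases hvv : v = ((la : List Int).length : Int)
        · rw [if_pos hvv] at hv
          cases hv; subst hvv; exact hA
        · rw [if_neg hvv] at hv
          exact hinv v b' hv
    · have hA : findCorrespondingBucket ((la : List Int).length : Int) bsa = some b :=
        hinv _ b hm
      rw [show altStep (pmGo bsa 0 []) (sA, memo) la
            = ((sA.1.modify b (fun x => x ++ [la]), sA.2 ++ [(b : Int)]), memo) by
            simp only [altStep, hm],
          show aStep bsa sA la = (sA.1.modify b (fun x => x ++ [la]), sA.2 ++ [(b : Int)]) by
            simp only [aStep, hA]]
      exact ih _ memo hinv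

-- ===== VERDICT (by name: the statement is the Claim_ definition above) =====
theorem makeBucketwiseLevelArr_spec : Claim_equal_makeBucketwiseLevelArr := by
  intro laa bsa _ _
  unfold Spec_makeBucketwiseLevelArr makeBucketwiseLevelArr makeBucketwiseLevelArr_alt
  rw [fold_eq bsa laa _ PySem.Dict.empty (by intro v b h; simp [PySem.Dict.empty, PySem.Dict.get?] at h)]
  rfl
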